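-- pv_equiv track=rewrite | github.com/frank1ma/AutomaticModelSelection | code1/nn_evolutionary.py | rectify_activations_offspring
-- ===== SOURCE A (Python) =====
-- def rectify_activations_offspring(stringModel):
-- 	"""Rectify the model so that all the similar layers have the same activation"""
--
-- 	used_activations = {}
--
-- 	for i in range(len(stringModel)-1):  #Last layer is disregarded as it sould not be changed
--
-- 		layer = stringModel[i]
--
-- 		layer_type = layer[0]
-- 		activation = layer[2]
--
-- 		if layer_type  in used_activations:
-- 			layer[2] = used_activations[layer_type]
-- 		else:
-- 			used_activations[layer_type] = activation
--
-- 	return used_activations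
-- ===== SOURCE B (Python) =====
-- def rectify_activations_offspring(stringModel):
--     """Rectify the model so that all the similar layers have the same activation.
--
--     Two passes: first record the first-seen activation per layer type,
--     then rewrite every non-last layer's activation from that table.
--     (Same in-place mutation of stringModel as the original.)
--     """
--     used_activations = {}
--     for layer in stringModel[:-1]:
--         if layer[0] not in used_activations:
--             used_activations[layer[0]] = layer[2]
--     for layer in stringModel[:-1]:
--         layer[2] = used_activations[layer[0]]
--     return used_activations
-- ===== Notes on version B (the rewrite author's own statement) =====
-- stated objective: simpler
-- what changed: Replaces the single index loop that interleaves recording and rewriting with two plain passes over stringModel[:-1]: one read-only pass building the first-seen activation table, one pass rewriting every layer from it (overwriting a first occurrence with its own recorded activation is a no-op, so the mutation and the returned dict coincide).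
import Mathlib
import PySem

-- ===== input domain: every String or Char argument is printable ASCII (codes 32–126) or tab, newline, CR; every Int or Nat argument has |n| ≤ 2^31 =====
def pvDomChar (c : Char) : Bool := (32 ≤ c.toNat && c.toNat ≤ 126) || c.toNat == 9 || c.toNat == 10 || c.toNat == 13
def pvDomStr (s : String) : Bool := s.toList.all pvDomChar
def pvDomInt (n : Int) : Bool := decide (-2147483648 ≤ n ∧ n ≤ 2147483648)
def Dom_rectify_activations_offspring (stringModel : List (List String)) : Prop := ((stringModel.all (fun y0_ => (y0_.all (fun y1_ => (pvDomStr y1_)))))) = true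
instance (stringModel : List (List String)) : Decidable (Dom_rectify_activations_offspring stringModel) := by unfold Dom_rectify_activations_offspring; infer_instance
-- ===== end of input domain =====

-- B replaces A's interleaved record-and-rewrite index loop with two plain passes over
-- stringModel[:-1] (record first-seen activation, then rewrite from the table); same return
-- value and same in-place mutation; the theorems below are about the RETURN value only.


-- ===== PORT A =====
-- one iteration of A's loop body: fetch stringModel[i], branch on the dict, mutating the
-- list (layer[2] = …) or inserting into the dict
def rectifyStepA (st : List (List String) × PySem.Dict String String) (i : Int) :
    List (List String) × PySem.Dict String String :=
  let layer := PySem.List.pyGetD st.1 i []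
  let layer_type := PySem.List.pyGetD layer 0 ""
  let activation := PySem.List.pyGetD layer 2 ""
  if st.2.contains layer_type then
    (PySem.List.pySetD st.1 i (PySem.List.pySetD layer 2 (st.2.getD layer_type "")), st.2)
  else
    (st.1, st.2.insert layer_type activation)

def rectify_activations_offspring (stringModel : List (List String)) : List (String × String) :=
  ((PySem.List.pyRange 0 (PySem.List.len stringModel - 1) 1).foldl rectifyStepA
    (stringModel, PySem.Dict.empty)).2.items

-- ===== PORT B =====
-- first pass of Source B: record the first-seen activation per layer type.  Source B's second pass
-- only mutates stringModel in place and does not touch the returned dict, so the port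
-- (return value under the convention) is the first pass's dict.
def rectify_activations_offspring_alt (stringModel : List (List String)) : List (String × String) :=
  ((PySem.List.slice stringModel none (some (-1))).foldl
    (fun (used : PySem.Dict String String) layer =>
      if used.contains (PySem.List.pyGetD layer 0 "") then used
      else used.insert (PySem.List.pyGetD layer 0 "") (PySem.List.pyGetD layer 2 ""))
    PySem.Dict.empty).items

-- ===== PRECONDITION & SPEC =====
-- Pre_ excludes exactly the inputs on which Python raises IndexError: some non-last layer
-- has fewer than 3 entries (layer[0] / layer[2] / the layer[2] assignment).
def Pre_rectify_activations_offspring (stringModel : List (List String)) : Prop :=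
  ∀ layer ∈ stringModel.dropLast, 3 ≤ layer.length
instance (stringModel : List (List String)) : Decidable (Pre_rectify_activations_offspring stringModel) := by unfold Pre_rectify_activations_offspring; infer_instance
def pvWitness_rectify_activations_offspring : List (List String) :=
  [["dense", "64", "relu"], ["conv", "3", "tanh"], ["dense", "32", "sigmoid"], ["out"]]

def Spec_rectify_activations_offspring (stringModel : List (List String)) (out : List (String × String)) : Prop := out = rectify_activations_offspring_alt stringModel
instance (stringModel : List (List String)) (out : List (String × String)) : Decidable (Spec_rectify_activations_offspring stringModel out) := by unfold Spec_rectify_activations_offspring; infer_instance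

-- ===== CLAIM (what is proved, stated in full; the proofs are below) =====
def Claim_equal_rectify_activations_offspring : Prop := ∀ (stringModel : List (List String)), Dom_rectify_activations_offspring stringModel → Pre_rectify_activations_offspring stringModel → Spec_rectify_activations_offspring stringModel (rectify_activations_offspring stringModel)

-- ===== LEMMAS AND PROOFS =====

-- B's first-pass fold, as a function of the travelled list
def rectFoldB (l : List (List String)) (d : PySem.Dict String String) : PySem.Dict String String :=
  l.foldl
    (fun (used : PySem.Dict String String) layer =>
      if used.contains (PySem.List.pyGetD layer 0 "") then used
      else used.insert (PySem.List.pyGetD layer 0 "") (PySem.List.pyGetD layer 2 ""))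
    d

-- A's loop from index a, when the still-to-be-visited layers `rest` are a prefix of the
-- (possibly already-mutated) model list from index a on, yields exactly B's fold over
-- `rest`: the mutation in the `contains` branch only rewrites index i itself and never the
-- part still to be visited.
theorem loopA_eq_foldB (rest : List (List String)) :
    ∀ (m : List (List String)) (d : PySem.Dict String String) (a : Nat),
      rest <+: m.drop a →
      ((PySem.List.pyRange (a : Int) ((a : Int) + rest.length) 1).foldl rectifyStepA (m, d)).2
        = rectFoldB rest d := by
  induction rest with
  | nil =>
      intro m d a h
      simp [PySem.List.pyRange_one_eq_nil, rectFoldB]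
  | cons layer rest ih =>
      intro m d a h
      obtain ⟨t, ht⟩ := h
      have ha : a < m.length := by
        by_contra hle
        rw [List.drop_eq_nil_of_le (by omega : m.length ≤ a)] at ht
        simp at ht
      have hget : m.getD a [] = layer := by
        have h0 : (m.drop a)[0]? = some layer := by rw [← ht]; rfl
        simp [List.getD, List.getElem?_drop] at h0 ⊢
        simp [h0]
      have htail : rest ++ t = m.drop (a + 1) := by
        have := congrArg List.tail ht
        simpa [List.tail_drop] using this
      rw [PySem.List.pyRange_one_cons (by push_cast [List.length_cons]; omega)]
      simp only [List.foldl_cons]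
      rw [rectifyStepA]
      simp only [PySem.List.pyGetD_natCast, hget]
      by_cases hc : d.contains (PySem.List.pyGetD layer 0 "") = true
      · simp only [hc, if_true]
        have hdrop : rest <+: (PySem.List.pySetD m (a : Int)
            (PySem.List.pySetD layer 2 (d.getD (PySem.List.pyGetD layer 0 "") ""))).drop (a + 1) := by
          have hset : (PySem.List.pySetD m (a : Int)
              (PySem.List.pySetD layer 2 (d.getD (PySem.List.pyGetD layer 0 "") ""))).drop (a + 1)
              = m.drop (a + 1) := by
            simp [PySem.List.pySetD, PySem.List.pySet?, PySem.List.pyIdx?, ha, List.drop_set]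
          exact ⟨t, by rw [hset]; exact htail⟩
        have := ih _ d (a + 1) hdrop
        rw [show ((a + 1 : Nat) : Int) = (a : Int) + 1 by push_cast; ring] at this
        rw [show ((a : Int) + 1) + (rest.length : Int) = (a : Int) + ((layer :: rest).length : Int) by
          push_cast [List.length_cons]; omega] at this
        rw [this]
        simp [rectFoldB, hc]
      · simp only [hc, if_false, Bool.false_eq_true]
        have := ih m (d.insert (PySem.List.pyGetD layer 0 "") (PySem.List.pyGetD layer 2 "")) (a + 1) ⟨t, htail⟩
        rw [show ((a + 1 : Nat) : Int) = (a : Int) + 1 by push_cast; ring] at this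
        rw [show ((a : Int) + 1) + (rest.length : Int) = (a : Int) + ((layer :: rest).length : Int) by
          push_cast [List.length_cons]; omega] at this
        rw [this]
        simp [rectFoldB, hc]

-- ===== VERDICT (by name: the statement is the Claim_ definition above) =====
theorem rectify_activations_offspring_spec : Claim_equal_rectify_activations_offspring := by
  intro sm _ _
  unfold Spec_rectify_activations_offspring
  unfold rectify_activations_offspring rectify_activations_offspring_alt
  rw [PySem.List.slice_to_neg_one]
  cases sm with
  | nil => rfl
  | cons x xs =>
      have hlen : PySem.List.len (x :: xs) - 1 = (0 : Int) + (((x :: xs).dropLast.length : Nat) : Int) := by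
        simp [PySem.List.len_eq, List.length_dropLast]
      rw [hlen]
      have := loopA_eq_foldB ((x :: xs).dropLast) (x :: xs) PySem.Dict.empty 0
        (by simpa using List.dropLast_prefix (x :: xs))
      rw [show ((0 : Nat) : Int) = (0 : Int) from rfl] at this
      rw [this]
      rfl
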